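-- pv_equiv track=rewrite | github.com/kavigupta/neurosym-lib | neurosym/dsl/constructibility.py | _merge_subst
-- ===== SOURCE A (Python) =====
-- def _merge_subst(base, extension):
--     """Merge two substitutions, return None if inconsistent."""
--     merged = dict(base)
--     for k, v in extension.items():
--         if k in merged:
--             if merged[k] != v:
--                 return None
--         else:
--             merged[k] = v
--     return merged
-- ===== SOURCE B (Python) =====
-- def _merge_subst(base, extension):
--     """Merge two substitutions, return None if inconsistent."""
--     pairs = set(base.items()) | set(extension.items())
--     if len(pairs) != len({k for k, _ in pairs}):
--         return None
--     return {**base, **extension}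
-- ===== Notes on version B (the rewrite author's own statement) =====
-- stated objective: alternative
-- what changed: Conflict detection is replaced by a set-cardinality test: B pools the distinct (key,value) pairs of both dicts and declares a conflict iff there are more distinct pairs than distinct keys (no per-key value comparison at all), then builds the result in one shot as {**base, **extension} instead of A's copy-and-check mutation loop.
import Mathlib
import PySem

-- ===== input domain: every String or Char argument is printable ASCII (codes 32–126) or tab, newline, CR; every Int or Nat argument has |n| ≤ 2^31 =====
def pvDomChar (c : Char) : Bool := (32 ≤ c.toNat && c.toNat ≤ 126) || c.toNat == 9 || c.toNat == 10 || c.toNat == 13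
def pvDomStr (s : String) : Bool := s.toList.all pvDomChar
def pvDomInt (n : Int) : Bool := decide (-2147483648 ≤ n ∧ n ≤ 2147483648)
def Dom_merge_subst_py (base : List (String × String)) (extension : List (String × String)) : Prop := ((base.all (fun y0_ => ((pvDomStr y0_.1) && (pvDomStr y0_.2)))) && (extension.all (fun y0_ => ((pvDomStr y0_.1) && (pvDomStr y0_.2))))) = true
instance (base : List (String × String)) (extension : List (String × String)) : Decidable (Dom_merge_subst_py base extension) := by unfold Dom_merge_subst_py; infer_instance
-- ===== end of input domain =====

-- B detects conflicts by a set-cardinality test (#distinct pairs vs #distinct keys) and builds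
-- the union in one shot — a different algorithm, same cost (objective: alternative).

-- ===== PORT A =====
-- the 'for k, v in extension.items(): …' loop with its early 'return None'
def mergeSubstLoopA (merged : PySem.Dict String String) :
    List (String × String) → Option (PySem.Dict String String)
  | [] => some merged
  | (k, v) :: rest =>
    if merged.contains k then
      if merged.get? k ≠ some v then none
      else mergeSubstLoopA merged rest
    else mergeSubstLoopA (merged.insert k v) rest

def merge_subst_py (base : List (String × String)) (extension : List (String × String)) :
    Option (List (String × String)) :=
  (mergeSubstLoopA (PySem.Dict.ofList base) (PySem.Dict.ofList extension).items).map
    PySem.Dict.items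

-- ===== PORT B =====
def merge_subst_py_alt (base : List (String × String)) (extension : List (String × String)) :
    Option (List (String × String)) :=
  let b := PySem.Dict.ofList base
  let e := PySem.Dict.ofList extension
  -- pairs = set(base.items()) | set(extension.items()); only lengths of it and of its key set
  -- are consumed below, so the unmodelled hash iteration order is irrelevant
  let pairs : PySem.Set (String × String) :=
    PySem.Set.union (PySem.Set.ofList b.items) (PySem.Set.ofList e.items)
  -- {k for k, _ in pairs}
  let keyset : PySem.Set String := PySem.Set.ofList (pairs.map Prod.fst)
  if PySem.Set.len pairs ≠ PySem.Set.len keyset then none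
  else some ((b.update e.items).items)   -- {**base, **extension}

-- ===== PRECONDITION & SPEC =====
def Spec_merge_subst_py (base : List (String × String)) (extension : List (String × String)) (out : Option (List (String × String))) : Prop := out = merge_subst_py_alt base extension
instance (base : List (String × String)) (extension : List (String × String)) (out : Option (List (String × String))) : Decidable (Spec_merge_subst_py base extension out) := by unfold Spec_merge_subst_py; infer_instance

-- ===== CLAIM (what is proved, stated in full; the proofs are below) =====
def Claim_equal_merge_subst_py : Prop := ∀ (base : List (String × String)) (extension : List (String × String)), Dom_merge_subst_py base extension → Spec_merge_subst_py base extension (merge_subst_py base extension)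

-- ===== LEMMAS AND PROOFS =====

-- ---- A-side: characterise the loop ----

-- inserting a pair that is already present (same key, same value) leaves the dict unchanged
theorem insert_of_get?_eq_some {d : PySem.Dict String String} {k v : String}
    (hnd : d.keys.Nodup) (h : d.get? k = some v) : d.insert k v = d := by
  apply PySem.Dict.ext
  rw [PySem.Dict.items_insert_of_contains d v (by
    rw [PySem.Dict.contains_eq_isSome_get?, h]; rfl)]
  have hkv : (k, v) ∈ d.items := PySem.Dict.mem_items_of_get?_eq_some d h
  have hinj := List.inj_on_of_nodup_map (f := Prod.fst) (l := d.items)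
    (by simpa [PySem.Dict.keys] using hnd)
  conv_rhs => rw [← List.map_id d.items]
  apply List.map_congr_left
  intro p hp
  by_cases hpk : p.1 = k
  · have : p = (k, v) := hinj hp hkv (by simpa using hpk)
    simp [this]
  · simp [hpk]

-- the A loop, characterised: conflicts decide None, otherwise the result is d.update l
theorem mergeSubstLoopA_eq (l : List (String × String)) (d : PySem.Dict String String)
    (hnd : d.keys.Nodup) (hl : (l.map Prod.fst).Nodup) :
    mergeSubstLoopA d l =
      if ∀ p ∈ l, d.contains p.1 → d.get? p.1 = some p.2 then some (d.update l) else none := by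
  induction l generalizing d with
  | nil => simp [mergeSubstLoopA, PySem.Dict.update]
  | cons p rest ih =>
    obtain ⟨k, v⟩ := p
    simp only [List.map_cons, List.nodup_cons] at hl
    by_cases hc : d.contains k = true
    · by_cases hv : d.get? k = some v
      · have hins : d.insert k v = d := insert_of_get?_eq_some hnd hv
        have hupd : d.update ((k, v) :: rest) = d.update rest := by
          show (d.insert k v).update rest = d.update rest
          rw [hins]
        simp only [mergeSubstLoopA, hc, if_true, hv, ne_eq, not_true_eq_false, if_false]
        rw [ih d hnd hl.2, hupd]
        have hcondiff : (∀ p ∈ (k, v) :: rest, d.contains p.1 → d.get? p.1 = some p.2)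
            ↔ (∀ p ∈ rest, d.contains p.1 → d.get? p.1 = some p.2) := by
          simp [hv]
        simp only [hcondiff]
      · simp [mergeSubstLoopA, hc, hv]
    · have hc' : d.contains k = false := by simpa using hc
      have key_ne : ∀ q ∈ rest, q.1 ≠ k := by
        intro q hq
        exact fun h => hl.1 (h ▸ List.mem_map_of_mem hq)
      simp only [mergeSubstLoopA, hc', Bool.false_eq_true, if_false]
      rw [ih (d.insert k v) (PySem.Dict.nodup_keys_insert d k v hnd) hl.2]
      have hupd : d.update ((k, v) :: rest) = (d.insert k v).update rest := rfl
      rw [hupd]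
      have hiff : (∀ p ∈ rest, (d.insert k v).contains p.1 → (d.insert k v).get? p.1 = some p.2)
          ↔ (∀ p ∈ (k, v) :: rest, d.contains p.1 → d.get? p.1 = some p.2) := by
        rw [List.forall_mem_cons]
        constructor
        · intro h
          refine ⟨by simp [hc'], fun q hq hq' => ?_⟩
          have hne : q.1 ≠ k := key_ne q hq
          rw [← PySem.Dict.get?_insert_of_ne d v hne]
          apply h q hq
          rw [PySem.Dict.contains_insert d k q.1 v, hq', Bool.or_true]
        · rintro ⟨-, h⟩ q hq hq'
          have hne : q.1 ≠ k := key_ne q hq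
          rw [PySem.Dict.get?_insert_of_ne d v hne]
          apply h q hq
          rw [PySem.Dict.contains_insert d k q.1 v] at hq'
          rcases Bool.or_eq_true_iff.1 hq' with h' | h'
          · exact absurd (by simpa using h') hne
          · exact h'
      simp only [hiff]

-- ---- B-side: cardinality facts about PySem.Set ----

-- updating by the deduplicated list is the same as updating by the list itself
theorem update_ofList {α : Type} [BEq α] [LawfulBEq α] (y : List α) (s : PySem.Set α) :
    s.update (PySem.Set.ofList y) = s.update y := by
  induction y using List.reverseRecOn generalizing s with
  | nil => simp [PySem.Set.ofList_nil]
  | append_singleton ys a ih =>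
    rw [PySem.Set.ofList_append_singleton, PySem.Set.update_append,
      PySem.Set.update_cons, PySem.Set.update_nil]
    by_cases hm : a ∈ PySem.Set.ofList ys
    · rw [PySem.Set.add_of_mem hm, ih,
        PySem.Set.add_of_mem ((PySem.Set.mem_update s ys a).2
          (Or.inr ((PySem.Set.mem_ofList ys a).1 hm)))]
    · rw [PySem.Set.add_of_not_mem hm, PySem.Set.update_append,
        PySem.Set.update_cons, PySem.Set.update_nil, ih]

-- set(x) | set(y) holds exactly the distinct elements of x ++ y, in that order
theorem union_ofList {α : Type} [BEq α] [LawfulBEq α] (x y : List α) :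
    PySem.Set.union (PySem.Set.ofList x) (PySem.Set.ofList y) = PySem.Set.ofList (x ++ y) := by
  show (PySem.Set.ofList x).update (PySem.Set.ofList y) = _
  rw [update_ofList, PySem.Set.ofList_append]

theorem ofList_sublist {α : Type} [BEq α] [LawfulBEq α] (l : List α) :
    (PySem.Set.ofList l).Sublist l := by
  induction l using List.reverseRecOn with
  | nil => simp [PySem.Set.ofList_nil]
  | append_singleton ys a ih =>
    rw [PySem.Set.ofList_append_singleton]
    by_cases hm : a ∈ PySem.Set.ofList ys
    · rw [PySem.Set.add_of_mem hm]
      exact ih.trans (List.sublist_append_left ys [a])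
    · rw [PySem.Set.add_of_not_mem hm]
      exact ih.append (List.Sublist.refl [a])

-- the deduplicated list has full length exactly when the list had no duplicates
theorem length_ofList_eq_iff {α : Type} [BEq α] [LawfulBEq α] (l : List α) :
    (PySem.Set.ofList l).length = l.length ↔ l.Nodup := by
  constructor
  · intro h
    have := (ofList_sublist l).eq_of_length h
    rw [← this]
    exact PySem.Set.nodup_ofList l
  · intro h
    rw [PySem.Set.ofList_eq_self_of_nodup l h]

-- the distinct pairs of both dicts have pairwise-distinct keys ⟺ A's no-conflict condition
theorem nodup_keys_iff_no_conflict (b e : PySem.Dict String String)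
    (hb : b.keys.Nodup) (he : e.keys.Nodup) :
    ((PySem.Set.ofList (b.items ++ e.items)).map Prod.fst).Nodup
      ↔ (∀ p ∈ e.items, b.contains p.1 → b.get? p.1 = some p.2) := by
  constructor
  · intro h p hp hbc
    obtain ⟨v, hv⟩ : ∃ v, b.get? p.1 = some v := by
      rw [PySem.Dict.contains_eq_isSome_get?] at hbc
      exact Option.isSome_iff_exists.1 hbc
    have h1 : (p.1, v) ∈ PySem.Set.ofList (b.items ++ e.items) := by
      rw [PySem.Set.mem_ofList, List.mem_append]
      exact Or.inl (PySem.Dict.mem_items_of_get?_eq_some b hv)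
    have h2 : p ∈ PySem.Set.ofList (b.items ++ e.items) := by
      rw [PySem.Set.mem_ofList, List.mem_append]
      exact Or.inr hp
    have := List.inj_on_of_nodup_map h h1 h2 (by rfl)
    rw [hv, ← this]
  · intro hC
    apply (PySem.Set.nodup_ofList (b.items ++ e.items)).map_on
    intro x hx y hy hxy
    rw [PySem.Set.mem_ofList, List.mem_append] at hx hy
    have hget : ∀ q : String × String, (q ∈ b.items ∨ q ∈ e.items) →
        b.get? q.1 = some q.2 ∨ (¬ b.contains q.1 = true ∧ e.get? q.1 = some q.2) := by
      rintro ⟨qk, qv⟩ (hq | hq)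
      · exact Or.inl (PySem.Dict.get?_of_mem_items b hq hb)
      · by_cases hc : b.contains qk = true
        · exact Or.inl (hC _ hq hc)
        · exact Or.inr ⟨hc, PySem.Dict.get?_of_mem_items e hq he⟩
    have hx' := hget x hx
    have hy' := hget y hy
    rcases hx' with hx' | ⟨hxc, hx'⟩ <;> rcases hy' with hy' | ⟨hyc, hy'⟩
    · rw [hxy] at hx'
      exact Prod.ext hxy (Option.some_injective _ (hx'.symm.trans hy'))
    · exact absurd (by rw [PySem.Dict.contains_eq_isSome_get?, ← hxy, hx']; rfl) hyc
    · exact absurd (by rw [PySem.Dict.contains_eq_isSome_get?, hxy, hy']; rfl) hxc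
    · rw [hxy] at hx'
      exact Prod.ext hxy (Option.some_injective _ (hx'.symm.trans hy'))

-- ===== VERDICT (by name: the statement is the Claim_ definition above) =====
theorem merge_subst_py_spec : Claim_equal_merge_subst_py := by
  intro base extension _
  unfold Spec_merge_subst_py merge_subst_py merge_subst_py_alt
  have hb : (PySem.Dict.ofList base).keys.Nodup := PySem.Dict.nodup_keys_ofList base
  have he : (PySem.Dict.ofList extension).keys.Nodup := PySem.Dict.nodup_keys_ofList extension
  have hei : ((PySem.Dict.ofList extension).items.map Prod.fst).Nodup := by
    simpa [PySem.Dict.keys] using he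
  rw [mergeSubstLoopA_eq (PySem.Dict.ofList extension).items (PySem.Dict.ofList base) hb hei]
  simp only [union_ofList]
  set P := PySem.Set.ofList
    ((PySem.Dict.ofList base).items ++ (PySem.Dict.ofList extension).items) with hP
  have hcard : (PySem.Set.len P ≠ PySem.Set.len (PySem.Set.ofList (P.map Prod.fst)))
      ↔ ¬ (P.map Prod.fst).Nodup := by
    rw [PySem.Set.len_eq, PySem.Set.len_eq, not_iff_not, Nat.cast_inj]
    constructor
    · intro h
      exact (length_ofList_eq_iff (P.map Prod.fst)).1 (by rw [← h, List.length_map])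
    · intro h
      rw [(length_ofList_eq_iff (P.map Prod.fst)).2 h, List.length_map]
  by_cases hcond : ∀ p ∈ (PySem.Dict.ofList extension).items,
      (PySem.Dict.ofList base).contains p.1 → (PySem.Dict.ofList base).get? p.1 = some p.2
  · have hnd := (nodup_keys_iff_no_conflict _ _ hb he).2 hcond
    rw [if_pos hcond, if_neg (by
      rw [hcard]
      exact not_not_intro hnd)]
    rfl
  · have hnnd : ¬ ((P.map Prod.fst).Nodup) :=
      fun h => hcond ((nodup_keys_iff_no_conflict _ _ hb he).1 h)
    rw [if_neg hcond, if_pos (hcard.2 hnnd)]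
    rfl
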